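-- pv_equiv track=rewrite | github.com/akashsonowal/interview-prep | interview_prep/coding/dsa/extract_nums.py | extract_nums
-- ===== SOURCE A (Python) =====
-- def extract_nums(ip):
--     i = 0
--     res = []
--
--     while i < len(ip):
--         if ip[i].isdigit():
--             l = r = i
--             while l >= 0 and ip[l].isdigit():
--                 l -= 1
--             while r < len(ip) and ip[r].isdigit():
--                 r += 1
--             res.append(ip[l + 1: r])
--             i = r
--         else:
--             i += 1
--
--     return res
-- ===== SOURCE B (Python) =====
-- def extract_nums(ip):
--     # One forward pass with a current-run accumulator (no index management,
--     # no backward scan, no slicing).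
--     res = []
--     cur = ""
--     for ch in ip:
--         if ch.isdigit():
--             cur += ch
--         elif cur:
--             res.append(cur)
--             cur = ""
--     if cur:
--         res.append(cur)
--     return res
-- ===== Notes on version B (the rewrite author's own statement) =====
-- stated objective: simpler
-- what changed: Replaces the index-based two-pointer scan (with a redundant backward scan and slicing per run) by a single forward pass that accumulates the current digit run and flushes it at each non-digit and at the end.
import Mathlib
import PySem

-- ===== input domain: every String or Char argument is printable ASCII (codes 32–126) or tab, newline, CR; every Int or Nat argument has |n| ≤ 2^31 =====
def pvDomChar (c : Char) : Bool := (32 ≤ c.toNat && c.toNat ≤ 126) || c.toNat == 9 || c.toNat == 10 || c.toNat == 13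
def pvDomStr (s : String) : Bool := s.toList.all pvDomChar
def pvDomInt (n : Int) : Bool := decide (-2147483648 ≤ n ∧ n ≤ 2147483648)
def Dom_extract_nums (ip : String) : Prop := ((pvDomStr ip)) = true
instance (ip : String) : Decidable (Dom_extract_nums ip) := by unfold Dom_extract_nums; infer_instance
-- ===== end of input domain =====

-- B replaces A's two-pointer scan (backward + forward scan and slicing) by one
-- forward pass accumulating the current digit run; objective: simpler.

-- ===== PORT A =====
-- inner 'while l >= 0 and ip[l].isdigit(): l -= 1' (recursion on the Nat index l;
-- the 'l >= 0' test is the match on 0)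
def pvALeft (cs : List Char) : Nat → Int
  | 0 => if PySem.Chars.isdigit (cs.getD 0 ' ') then -1 else 0
  | n + 1 => if PySem.Chars.isdigit (cs.getD (n + 1) ' ') then pvALeft cs n else ((n : Int) + 1)

-- inner 'while r < len(ip) and ip[r].isdigit(): r += 1'
-- (fuel cs.length ≥ the number of remaining iterations makes the loop structural)
def pvARight (cs : List Char) (fuel : Nat) (r : Nat) : Nat :=
  match fuel with
  | 0 => r
  | f + 1 =>
    if r < cs.length then
      if PySem.Chars.isdigit (cs.getD r ' ') then pvARight cs f (r + 1) else r
    else r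

-- outer 'while i < len(ip)' loop, accumulating res (same fuel device)
def pvALoop (cs : List Char) (fuel : Nat) (i : Nat) (res : List String) : List String :=
  match fuel with
  | 0 => res
  | f + 1 =>
    if i < cs.length then
      if PySem.Chars.isdigit (cs.getD i ' ') then
        let l := pvALeft cs i
        let r := pvARight cs cs.length i
        pvALoop cs f r (res ++ [String.mk (PySem.List.slice cs (some (l + 1)) (some (r : Int)))])
      else pvALoop cs f (i + 1) res
    else res

def extract_nums (ip : String) : List String := pvALoop ip.toList ip.toList.length 0 []

-- ===== PORT B =====
-- the 'for ch in ip' loop of Source B, threading (res, cur)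
def pvBFold (cs : List Char) (res : List String) (cur : List Char) : List String × List Char :=
  match cs with
  | [] => (res, cur)
  | c :: t =>
    if PySem.Chars.isdigit c then pvBFold t res (cur ++ [c])
    else if cur ≠ [] then pvBFold t (res ++ [String.mk cur]) []
    else pvBFold t res cur

def extract_nums_alt (ip : String) : List String :=
  let p := pvBFold ip.toList [] []
  if p.2 ≠ [] then p.1 ++ [String.mk p.2] else p.1

-- ===== PRECONDITION & SPEC =====
def Spec_extract_nums (ip : String) (out : List String) : Prop := out = extract_nums_alt ip
instance (ip : String) (out : List String) : Decidable (Spec_extract_nums ip out) := by unfold Spec_extract_nums; infer_instance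

-- ===== CLAIM (what is proved, stated in full; the proofs are below) =====
def Claim_equal_extract_nums : Prop := ∀ (ip : String), Dom_extract_nums ip → Spec_extract_nums ip (extract_nums ip)

-- ===== LEMMAS AND PROOFS =====

-- canonical description: the maximal digit runs of a character list
def pvGroups (cs : List Char) : List (List Char) :=
  match cs with
  | [] => []
  | c :: t =>
    if PySem.Chars.isdigit c then
      (c :: t.takeWhile PySem.Chars.isdigit) :: pvGroups (t.dropWhile PySem.Chars.isdigit)
    else pvGroups t
termination_by cs.length
decreasing_by
  · have := List.length_dropWhile_le (p := PySem.Chars.isdigit) (l := t)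
    simp; omega
  · simp

theorem pv_take_takeWhile {p : Char → Bool} (l : List Char) :
    l.take (l.takeWhile p).length = l.takeWhile p := by
  induction l with
  | nil => simp
  | cons c t ih =>
    by_cases h : p c <;> simp [List.takeWhile_cons, h, ih]

theorem pv_dropWhile_eq_drop {p : Char → Bool} (l : List Char) :
    l.dropWhile p = l.drop (l.takeWhile p).length := by
  induction l with
  | nil => simp
  | cons c t ih =>
    by_cases h : p c <;> simp [List.dropWhile_cons, List.takeWhile_cons, h, ih]

theorem pv_head_dropWhile {p : Char → Bool} (l : List Char) {c : Char} {t : List Char}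
    (h : l.dropWhile p = c :: t) : p c = false := by
  have hh := List.head?_dropWhile_not p l
  rw [h] at hh
  simpa using hh

theorem pvARight_eq (cs : List Char) (fuel r : Nat) (hf : cs.length - r ≤ fuel) :
    pvARight cs fuel r = r + ((cs.drop r).takeWhile PySem.Chars.isdigit).length := by
  induction fuel generalizing r with
  | zero =>
    have hdrop : cs.drop r = [] := List.drop_eq_nil_of_le (by omega)
    simp [pvARight, hdrop]
  | succ f ih =>
    by_cases h : r < cs.length
    · have hdrop : cs.drop r = cs[r] :: cs.drop (r + 1) := List.drop_eq_getElem_cons h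
      have hgd : cs.getD r ' ' = cs[r] := List.getD_eq_getElem cs ' ' h
      by_cases hd : PySem.Chars.isdigit cs[r]
      · simp only [pvARight]
        rw [if_pos h, if_pos (by rw [hgd]; exact hd), ih (r + 1) (by omega),
          hdrop, List.takeWhile_cons, if_pos hd]
        simp; omega
      · simp only [pvARight]
        rw [if_pos h, if_neg (by rw [hgd]; exact hd), hdrop, List.takeWhile_cons,
          if_neg hd]
        simp
    · have hdrop : cs.drop r = [] := List.drop_eq_nil_of_le (by omega)
      simp only [pvARight]
      rw [if_neg h, hdrop]
      simp

theorem pvALeft_eq (cs : List Char) (i : Nat)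
    (hd : PySem.Chars.isdigit (cs.getD i ' ') = true)
    (hprev : i = 0 ∨ PySem.Chars.isdigit (cs.getD (i - 1) ' ') = false) :
    pvALeft cs i = (i : Int) - 1 := by
  rcases hprev with h0 | hp
  · subst h0
    simp only [pvALeft]
    rw [if_pos hd]
    norm_num
  · cases i with
    | zero =>
      simp only [pvALeft]
      rw [if_pos hd]
      norm_num
    | succ n =>
      simp only [Nat.succ_sub_one] at hp
      have hn : pvALeft cs n = (n : Int) := by
        cases n with
        | zero =>
          simp only [pvALeft]
          rw [if_neg (by rw [hp]; decide)]
          norm_num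
        | succ m =>
          simp only [pvALeft]
          rw [if_neg (by rw [hp]; decide)]
          push_cast; ring
      simp only [pvALeft]
      rw [if_pos hd, hn]
      push_cast; ring

theorem pvALoop_eq (cs : List Char) (fuel i : Nat) (res : List String)
    (hf : cs.length - i ≤ fuel)
    (hprev : PySem.Chars.isdigit (cs.getD i ' ') = true →
      i = 0 ∨ PySem.Chars.isdigit (cs.getD (i - 1) ' ') = false) :
    pvALoop cs fuel i res = res ++ (pvGroups (cs.drop i)).map String.mk := by
  induction fuel generalizing i res with
  | zero =>
    have hdrop : cs.drop i = [] := List.drop_eq_nil_of_le (by omega)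
    simp [pvALoop, hdrop, pvGroups]
  | succ f ih =>
    by_cases h : i < cs.length
    · have hdrop : cs.drop i = cs[i] :: cs.drop (i + 1) := List.drop_eq_getElem_cons h
      have hgd : cs.getD i ' ' = cs[i] := List.getD_eq_getElem cs ' ' h
      by_cases hd : PySem.Chars.isdigit cs[i]
      · -- digit branch: emit the run [i, r), continue at r
        have hdg : PySem.Chars.isdigit (cs.getD i ' ') = true := by rw [hgd]; exact hd
        have hL : pvALeft cs i = (i : Int) - 1 := pvALeft_eq cs i hdg (hprev hdg)
        have hR : pvARight cs cs.length i
            = i + ((cs.drop i).takeWhile PySem.Chars.isdigit).length :=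
          pvARight_eq cs cs.length i (by omega)
        have hk1 : 1 ≤ ((cs.drop i).takeWhile PySem.Chars.isdigit).length := by
          rw [hdrop, List.takeWhile_cons, if_pos hd]
          simp
        have hslice : PySem.List.slice cs (some (pvALeft cs i + 1))
              (some ((pvARight cs cs.length i : Nat) : Int))
            = (cs.drop i).takeWhile PySem.Chars.isdigit := by
          rw [hL, hR]
          have h1 : (i : Int) - 1 + 1 = (i : Int) := by ring
          have h2 : ((i + ((cs.drop i).takeWhile PySem.Chars.isdigit).length : Nat) : Int)
              = (i : Int) + (((cs.drop i).takeWhile PySem.Chars.isdigit).length : Int) := by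
            push_cast; ring
          rw [h1, h2, PySem.List.slice_natCast_add]
          exact pv_take_takeWhile (cs.drop i)
        have hdropr : cs.drop (pvARight cs cs.length i)
            = (cs.drop i).dropWhile PySem.Chars.isdigit := by
          rw [hR, pv_dropWhile_eq_drop, ← List.drop_drop]
        -- at the next index r, the character (if any) is not a digit
        have hnext : PySem.Chars.isdigit (cs.getD (pvARight cs cs.length i) ' ') = false := by
          set r := pvARight cs cs.length i with hr
          by_cases hlen : r < cs.length
          · have hgd2 : cs.getD r ' ' = cs[r] := List.getD_eq_getElem cs ' ' hlen
            have hdk : cs.drop r = cs[r] :: cs.drop (r + 1) := List.drop_eq_getElem_cons hlen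
            rw [hdropr] at hdk
            rw [hgd2]
            exact pv_head_dropWhile (cs.drop i) hdk
          · have : cs.getD r ' ' = ' ' := by
              rw [List.getD_eq_getElem?_getD, List.getElem?_eq_none (by omega)]
              rfl
            rw [this]; decide
        simp only [pvALoop]
        rw [if_pos h, if_pos hdg]
        rw [ih (pvARight cs cs.length i) _ (by rw [hR]; omega)
          (fun hcon => by rw [hnext] at hcon; cases hcon)]
        rw [hslice, hdropr]
        have hgroups : pvGroups (cs.drop i)
            = ((cs.drop i).takeWhile PySem.Chars.isdigit) ::
              pvGroups ((cs.drop i).dropWhile PySem.Chars.isdigit) := by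
          rw [hdrop, pvGroups, if_pos hd, List.takeWhile_cons, if_pos hd,
            List.dropWhile_cons, if_pos hd]
        rw [hgroups, List.map_cons]
        simp only [List.append_assoc, List.singleton_append]
      · -- non-digit branch
        simp only [pvALoop]
        rw [if_pos h, if_neg (by rw [hgd]; simpa using hd)]
        rw [ih (i + 1) res (by omega)]
        · have heq : pvGroups (cs.drop i) = pvGroups (cs.drop (i + 1)) := by
            rw [hdrop, pvGroups]; simp [hd]
          rw [heq]
        · intro _
          right
          simp only [Nat.add_sub_cancel, hgd]
          simpa using hd
    · have hdrop : cs.drop i = [] := List.drop_eq_nil_of_le (by omega)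
      simp [pvALoop, h, hdrop, pvGroups]

-- B-side: finalized pvBFold = res, then the pending run, then the remaining groups
def pvFinal (p : List String × List Char) : List String :=
  if p.2 ≠ [] then p.1 ++ [String.mk p.2] else p.1

theorem pvBFold_eq (cs : List Char) (res : List String) (cur : List Char) :
    pvFinal (pvBFold cs res cur)
      = res ++ (if cur = [] then (pvGroups cs).map String.mk
                else String.mk (cur ++ cs.takeWhile PySem.Chars.isdigit) ::
                     (pvGroups (cs.dropWhile PySem.Chars.isdigit)).map String.mk) := by
  induction cs generalizing res cur with
  | nil =>
    by_cases hc : cur = [] <;> simp [pvBFold, pvFinal, hc, pvGroups]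
  | cons c t ih =>
    by_cases hd : PySem.Chars.isdigit c
    · rw [pvBFold]
      simp only [hd, if_true]
      rw [ih]
      have hne : ¬ (cur ++ [c] = []) := by simp
      by_cases hc : cur = []
      · subst hc
        simp [hne, pvGroups, hd, List.takeWhile_cons, List.dropWhile_cons]
      · simp [hne, hc, List.takeWhile_cons, hd, List.dropWhile_cons]
    · rw [pvBFold]
      simp only [hd, Bool.false_eq_true, if_false]
      by_cases hc : cur = []
      · subst hc
        simp only [ne_eq, not_true_eq_false, if_false, reduceIte]
        rw [ih]
        simp [pvGroups, hd]
      · simp only [ne_eq, hc, not_false_eq_true, if_true]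
        rw [ih]
        simp [pvGroups, hd, List.takeWhile_cons, List.dropWhile_cons, hc]

-- ===== VERDICT (by name: the statement is the Claim_ definition above) =====
theorem extract_nums_spec : Claim_equal_extract_nums := by
  intro ip _
  unfold Spec_extract_nums extract_nums extract_nums_alt
  have hb : (let p := pvBFold ip.toList [] [];
      if p.2 ≠ [] then p.1 ++ [String.mk p.2] else p.1) = pvFinal (pvBFold ip.toList [] []) := rfl
  rw [hb, pvBFold_eq, pvALoop_eq ip.toList ip.toList.length 0 [] (by omega) (fun _ => Or.inl rfl)]
  simp
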